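-- pv_equiv track=rewrite | github.com/Fart-Butt/discordbot | butt_library.py | detect_code_block
-- ===== SOURCE A (Python) =====
-- def detect_code_block(text):
--     try:
--         words = text.split(" ")
--     except AttributeError:
--         return False
--     for w in words:
--         if w == "```" or w[:3] == "```" or w[-3:] == "```":
--             return True
--     return False
-- ===== SOURCE B (Python) =====
-- def detect_code_block(text):
--     try:
--         return (text.startswith("```") or text.endswith("```")
--                 or " ```" in text or "``` " in text)
--     except AttributeError:
--         return False
-- ===== Notes on version B (the rewrite author's own statement) =====
-- stated objective: simpler
-- what changed: Replaced the split-into-tokens-and-loop with four direct boundary checks on the raw string (startswith/endswith '```' or ' ```'/'``` ' as a substring), eliminating the tokenization entirely.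
import Mathlib
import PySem

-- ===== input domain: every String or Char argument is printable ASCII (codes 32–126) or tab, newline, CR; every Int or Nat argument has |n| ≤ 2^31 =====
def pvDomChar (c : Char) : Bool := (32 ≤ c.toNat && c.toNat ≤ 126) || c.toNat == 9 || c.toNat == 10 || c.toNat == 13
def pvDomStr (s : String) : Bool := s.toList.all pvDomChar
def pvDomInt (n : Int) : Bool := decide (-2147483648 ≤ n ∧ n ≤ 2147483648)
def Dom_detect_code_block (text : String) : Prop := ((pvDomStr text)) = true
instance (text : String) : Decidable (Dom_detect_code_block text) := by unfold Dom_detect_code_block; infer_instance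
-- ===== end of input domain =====

-- B replaces A's split-into-tokens-and-loop by four direct boundary checks on the raw
-- string (startswith/endswith "```", " ```"/"``` " as substrings); objective: simpler.
-- (Python's try/except AttributeError only guards non-str arguments; under the String
-- type of this port that branch is unreachable, in A and in B alike.)

-- ===== PORT A =====
-- for w in words: if w == "```" or w[:3] == "```" or w[-3:] == "```": return True / return False
def detectA_loop : List (List Char) → Bool
  | [] => false
  | w :: ws =>
    if w == ['`', '`', '`'] || PySem.List.slice w none (some 3) == ['`', '`', '`']
        || PySem.List.slice w (some (-3)) none == ['`', '`', '`'] then true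
    else detectA_loop ws

-- words = text.split(" "); the separator " " is a non-empty literal, so str.split cannot
-- raise here and we call PySem.Chars.splitOn (the sep ≠ "" form of split) directly.
def detect_code_block (text : String) : Bool :=
  detectA_loop (PySem.Chars.splitOn text.toList " ".toList)

-- ===== PORT B =====
-- return text.startswith("```") or text.endswith("```") or " ```" in text or "``` " in text
def detect_code_block_alt (text : String) : Bool :=
  PySem.Str.startswith text "```" || PySem.Str.endswith text "```"
    || PySem.Str.isIn " ```" text || PySem.Str.isIn "``` " text

-- ===== PRECONDITION & SPEC =====
def Spec_detect_code_block (text : String) (out : Bool) : Prop := out = detect_code_block_alt text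
instance (text : String) (out : Bool) : Decidable (Spec_detect_code_block text out) := by unfold Spec_detect_code_block; infer_instance

-- ===== CLAIM (what is proved, stated in full; the proofs are below) =====
def Claim_equal_detect_code_block : Prop := ∀ (text : String), Dom_detect_code_block text → Spec_detect_code_block text (detect_code_block text)

-- ===== LEMMAS AND PROOFS =====

theorem splitOn_go_eq (c : Char) (fuel : Nat) (l cur : List Char) (acc : List (List Char)) (h : l.length ≤ fuel) :
    PySem.Chars.splitOn.go [c] fuel l cur acc =
      acc.reverse ++ (List.splitOnP (· == c) l).modifyHead (cur.reverse ++ ·) := by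
  induction fuel generalizing l cur acc with
  | zero =>
    have : l = [] := List.eq_nil_of_length_eq_zero (Nat.le_zero.mp h)
    subst this
    simp [PySem.Chars.splitOn.go, List.splitOnP_nil]
  | succ n ih =>
    cases l with
    | nil => simp [PySem.Chars.splitOn.go, List.splitOnP_nil]
    | cons a rest =>
      rw [PySem.Chars.splitOn.go]
      by_cases hac : a = c
      · subst hac
        have hp : [a].isPrefixOf (a :: rest) = true := by simp [List.isPrefixOf]
        rw [if_pos hp]
        rw [ih _ _ _ (by simpa using Nat.le_of_succ_le_succ (by simpa using h))]
        simp [List.splitOnP_cons]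
        cases List.splitOnP (fun x => x == a) rest <;> simp
      · have hp : [c].isPrefixOf (a :: rest) = false := by
          simp [List.isPrefixOf]; exact fun hh => (hac hh.symm).elim
        rw [if_neg (by simp [hp])]
        rw [ih rest (a :: cur) acc (by simpa using Nat.le_of_succ_le_succ (by simpa using h))]
        rw [List.splitOnP_cons]
        have hpa : (a == c) = false := by simp [hac]
        rw [if_neg (by simp [hpa])]
        obtain ⟨hd, tl, hS⟩ := List.exists_cons_of_ne_nil (List.splitOnP_ne_nil (· == c) rest)
        rw [hS]
        simp

theorem chars_splitOn_eq (c : Char) (l : List Char) :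
    PySem.Chars.splitOn l [c] = List.splitOnP (· == c) l := by
  show PySem.Chars.splitOn.go [c] (l.length + 1) l [] [] = _
  rw [splitOn_go_eq c (l.length + 1) l [] [] (by omega)]
  cases List.splitOnP (· == c) l <;> simp

theorem splitOnP_head (p : Char → Bool) (l : List Char) :
    ∃ t, List.splitOnP p l = l.takeWhile (fun a => !p a) :: t := by
  induction l with
  | nil => exact ⟨[], by simp [List.splitOnP_nil]⟩
  | cons a xs ih =>
    by_cases hpa : p a
    · exact ⟨List.splitOnP p xs, by simp [List.splitOnP_cons, hpa, List.takeWhile]⟩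
    · obtain ⟨t, ht⟩ := ih
      refine ⟨t, ?_⟩
      simp [List.splitOnP_cons, hpa, ht, List.takeWhile]

theorem prefix_takeWhile_iff (p : Char → Bool) (T l : List Char) (hT : ∀ x ∈ T, p x = false) :
    T <+: l ↔ T <+: l.takeWhile (fun a => !p a) := by
  constructor
  · intro h
    induction T generalizing l with
    | nil => simp
    | cons t ts ih =>
      cases l with
      | nil => simp at h
      | cons a xs =>
        rw [List.cons_prefix_cons] at h
        obtain ⟨rfl, h2⟩ := h
        have hpt : p t = false := hT t (by simp)
        simp only [List.takeWhile, hpt, Bool.not_false]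
        rw [List.cons_prefix_cons]
        exact ⟨rfl, ih xs (fun x hx => hT x (by simp [hx])) h2⟩
  · intro h
    exact h.trans (List.takeWhile_prefix _)

theorem tail_tokens_prefix (T : List Char) (hT : ∀ x ∈ T, (x == ' ') = false) :
    ∀ l : List Char,
      (∃ w ∈ (List.splitOnP (· == ' ') l).tail, T <+: w) ↔ (' ' :: T) <:+: l := by
  intro l
  induction l with
  | nil => simp [List.splitOnP_nil]
  | cons a xs ih =>
    by_cases ha : (a == ' ') = true
    · obtain rfl : a = ' ' := by simpa using ha
      rw [List.splitOnP_cons, if_pos (by simp)]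
      obtain ⟨t, ht⟩ := splitOnP_head (· == ' ') xs
      constructor
      · intro hex
        simp only [List.tail_cons] at hex
        rw [ht] at hex
        rw [List.infix_cons_iff]
        rcases hex with ⟨w, hw, hpre⟩
        rcases List.mem_cons.mp hw with rfl | hw'
        · left
          rw [List.cons_prefix_cons]
          exact ⟨rfl, (prefix_takeWhile_iff (· == ' ') T xs hT).mpr hpre⟩
        · right
          exact (ih.mp ⟨w, by rw [ht]; simpa using hw', hpre⟩)
      · intro hin
        rcases List.infix_cons_iff.mp hin with hp | hi
        · rw [List.cons_prefix_cons] at hp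
          refine ⟨xs.takeWhile (fun a => !(a == ' ')), ?_, ?_⟩
          · simp [ht]
          · exact (prefix_takeWhile_iff (· == ' ') T xs hT).mp hp.2
        · obtain ⟨w, hw, hpre⟩ := ih.mpr hi
          exact ⟨w, by simpa using List.mem_of_mem_tail hw, hpre⟩
    · rw [List.splitOnP_cons, if_neg (by simp_all)]
      rw [List.tail_modifyHead]
      rw [ih]
      rw [List.infix_cons_iff]
      constructor
      · exact Or.inr
      · rintro (hp | hi)
        · rw [List.cons_prefix_cons] at hp
          exact absurd hp.1.symm (by simpa using ha)
        · exact hi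

theorem tokens_prefix (T : List Char) (hT : ∀ x ∈ T, (x == ' ') = false)
    (l : List Char) :
    (∃ w ∈ List.splitOnP (· == ' ') l, T <+: w) ↔ T <+: l ∨ (' ' :: T) <:+: l := by
  obtain ⟨t, ht⟩ := splitOnP_head (· == ' ') l
  constructor
  · rintro ⟨w, hw, hpre⟩
    rw [ht] at hw
    rcases List.mem_cons.mp hw with rfl | hw'
    · exact Or.inl ((prefix_takeWhile_iff (· == ' ') T l hT).mpr hpre)
    · exact Or.inr ((tail_tokens_prefix T hT l).mp ⟨w, by rw [ht]; simpa using hw', hpre⟩)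
  · rintro (hp | hi)
    · exact ⟨l.takeWhile (fun a => !(a == ' ')), by simp [ht],
        (prefix_takeWhile_iff (· == ' ') T l hT).mp hp⟩
    · obtain ⟨w, hw, hpre⟩ := (tail_tokens_prefix T hT l).mpr hi
      exact ⟨w, List.mem_of_mem_tail hw, hpre⟩

theorem splitOnP_append_singleton_neg (p : Char → Bool) (a : Char) (ha : p a = false)
    (l : List Char) :
    ∃ D L, List.splitOnP p l = D ++ [L] ∧ List.splitOnP p (l ++ [a]) = D ++ [L ++ [a]] := by
  induction l with
  | nil =>
    refine ⟨[], [], by simp [List.splitOnP_nil], ?_⟩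
    simp [List.splitOnP_cons, List.splitOnP_nil, ha]
  | cons x xs ih =>
    obtain ⟨D, L, h1, h2⟩ := ih
    by_cases hpx : p x = true
    · exact ⟨[] :: D, L, by simp [List.splitOnP_cons, hpx, h1],
        by simp [List.splitOnP_cons, hpx, h2]⟩
    · cases D with
      | nil =>
        refine ⟨[], x :: L, ?_, ?_⟩
        · simp [List.splitOnP_cons, hpx, h1]
        · simp [List.splitOnP_cons, hpx, h2]
      | cons d D' =>
        refine ⟨(x :: d) :: D', L, ?_, ?_⟩
        · simp [List.splitOnP_cons, hpx, h1]
        · simp [List.splitOnP_cons, hpx, h2]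

theorem splitOnP_reverse (p : Char → Bool) (l : List Char) :
    List.splitOnP p l.reverse = ((List.splitOnP p l).map List.reverse).reverse := by
  induction l with
  | nil => simp [List.splitOnP_nil]
  | cons a xs ih =>
    by_cases hpa : p a = true
    · rw [List.reverse_cons, List.splitOnP_append_cons p xs.reverse [] a hpa]
      rw [List.splitOnP_cons, if_pos hpa]
      simp [ih, List.splitOnP_nil]
    · obtain ⟨D, L, h1, h2⟩ := splitOnP_append_singleton_neg p a (by simpa using hpa) xs.reverse
      rw [List.reverse_cons, h2]
      rw [List.splitOnP_cons, if_neg (by simp [hpa])]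
      obtain ⟨hd, tl, hS⟩ := List.exists_cons_of_ne_nil (List.splitOnP_ne_nil p xs)
      rw [hS]
      rw [ih, hS] at h1
      simp at h1
      obtain ⟨hD, hL⟩ := h1
      simp [← hD, ← hL]

theorem tokens_suffix (T : List Char) (hT : ∀ x ∈ T, (x == ' ') = false)
    (l : List Char) :
    (∃ w ∈ List.splitOnP (· == ' ') l, T <:+ w) ↔ T <:+ l ∨ (T ++ [' ']) <:+: l := by
  have hTr : ∀ x ∈ T.reverse, (x == ' ') = false := fun x hx => hT x (List.mem_reverse.mp hx)
  have h := tokens_prefix T.reverse hTr l.reverse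
  rw [splitOnP_reverse] at h
  constructor
  · rintro ⟨w, hw, hsuf⟩
    have : ∃ w' ∈ ((List.splitOnP (· == ' ') l).map List.reverse).reverse, T.reverse <+: w' := by
      refine ⟨w.reverse, ?_, by simpa using hsuf⟩
      simp only [List.mem_reverse, List.mem_map]
      exact ⟨w, hw, rfl⟩
    rcases h.mp this with hp | hi
    · exact Or.inl (by simpa using hp)
    · refine Or.inr ?_
      have : (T ++ [' ']).reverse <:+: l.reverse := by simpa using hi
      exact List.reverse_infix.mp this
  · intro hor
    have : T.reverse <+: l.reverse ∨ (' ' :: T.reverse) <:+: l.reverse := by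
      rcases hor with hp | hi
      · exact Or.inl (by simpa using hp)
      · exact Or.inr (by simpa using List.reverse_infix.mpr hi)
    obtain ⟨w', hw', hpre⟩ := h.mpr this
    simp only [List.mem_reverse, List.mem_map] at hw'
    obtain ⟨w, hw, rfl⟩ := hw'
    exact ⟨w, hw, by simpa using hpre⟩

theorem token_test_iff (w : List Char) :
    (w == ['`', '`', '`'] || PySem.List.slice w none (some 3) == ['`', '`', '`']
      || PySem.List.slice w (some (-3)) none == ['`', '`', '`']) = true ↔
      ['`', '`', '`'] <+: w ∨ ['`', '`', '`'] <:+ w := by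
  rw [PySem.List.slice_to w (by norm_num : (0:Int) ≤ 3)]
  rw [PySem.List.slice_from_neg_ofNat w 3 (by norm_num)]
  simp only [Bool.or_eq_true, beq_iff_eq]
  constructor
  · rintro ((rfl | h1) | h2)
    · exact Or.inl (List.prefix_refl _)
    · exact Or.inl (by rw [List.prefix_iff_eq_take]; simpa using h1.symm)
    · exact Or.inr (by rw [List.suffix_iff_eq_drop]; simpa using h2.symm)
  · rintro (h | h)
    · refine Or.inl (Or.inr ?_)
      rw [List.prefix_iff_eq_take] at h
      simpa using h.symm
    · refine Or.inr ?_
      rw [List.suffix_iff_eq_drop] at h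
      simpa using h.symm

theorem detectA_loop_iff (ws : List (List Char)) :
    detectA_loop ws = true ↔ ∃ w ∈ ws, ['`', '`', '`'] <+: w ∨ ['`', '`', '`'] <:+ w := by
  induction ws with
  | nil => simp [detectA_loop]
  | cons w ws ih =>
    rw [detectA_loop]
    by_cases hc : (w == ['`', '`', '`'] || PySem.List.slice w none (some 3) == ['`', '`', '`']
        || PySem.List.slice w (some (-3)) none == ['`', '`', '`']) = true
    · rw [if_pos hc]
      simp only [true_iff]
      exact ⟨w, by simp, (token_test_iff w).mp hc⟩
    · rw [if_neg hc, ih]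
      constructor
      · rintro ⟨v, hv, hp⟩
        exact ⟨v, by simp [hv], hp⟩
      · rintro ⟨v, hv, hp⟩
        rcases List.mem_cons.mp hv with rfl | hv'
        · exact absurd ((token_test_iff v).mpr hp) hc
        · exact ⟨v, hv', hp⟩

set_option maxRecDepth 4096 in
theorem ports_agree (text : String) : detect_code_block text = detect_code_block_alt text := by
  have hT : ∀ x ∈ ['`','`','`'], (x == ' ') = false := by
    intro x hx
    rcases List.mem_cons.mp hx with rfl | hx <;> try rfl
    rcases List.mem_cons.mp hx with rfl | hx <;> try rfl
    rcases List.mem_cons.mp hx with rfl | hx <;> first | rfl | simp at hx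
  have hA : detect_code_block text = true ↔
      ((['`','`','`'] <+: text.toList ∨ (' ' :: ['`','`','`']) <:+: text.toList) ∨
       (['`','`','`'] <:+ text.toList ∨ (['`','`','`'] ++ [' ']) <:+: text.toList)) := by
    rw [detect_code_block]
    rw [show (" " : String).toList = [' '] by decide]
    rw [chars_splitOn_eq]
    rw [detectA_loop_iff]
    rw [← tokens_prefix _ hT]
    rw [← tokens_suffix _ hT]
    constructor
    · rintro ⟨w, hw, hp | hs⟩
      exacts [Or.inl ⟨w, hw, hp⟩, Or.inr ⟨w, hw, hs⟩]
    · rintro (⟨w, hw, hp⟩ | ⟨w, hw, hs⟩)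
      exacts [⟨w, hw, Or.inl hp⟩, ⟨w, hw, Or.inr hs⟩]
  have hB : detect_code_block_alt text = true ↔
      ((['`','`','`'] <+: text.toList ∨ (' ' :: ['`','`','`']) <:+: text.toList) ∨
       (['`','`','`'] <:+ text.toList ∨ (['`','`','`'] ++ [' ']) <:+: text.toList)) := by
    rw [detect_code_block_alt]
    simp only [PySem.Str.startswith_eq, PySem.Str.endswith_eq, PySem.Str.isIn_eq,
      Bool.or_eq_true, PySem.Chars.startswith_iff, PySem.Chars.endswith_iff,
      PySem.Chars.isIn_iff_infix,
      show ("```" : String).toList = ['`','`','`'] by decide,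
      show (" ```" : String).toList = (' ' :: ['`','`','`']) by decide,
      show ("``` " : String).toList = (['`','`','`'] ++ [' ']) by decide]
    constructor
    · rintro (((h | h) | h) | h)
      exacts [Or.inl (Or.inl h), Or.inr (Or.inl h), Or.inl (Or.inr h), Or.inr (Or.inr h)]
    · rintro ((h | h) | (h | h))
      exacts [Or.inl (Or.inl (Or.inl h)), Or.inl (Or.inr h), Or.inl (Or.inl (Or.inr h)), Or.inr h]
  have h := hA.trans hB.symm
  cases h1 : detect_code_block text <;> cases h2 : detect_code_block_alt text <;> simp_all

-- ===== VERDICT (by name: the statement is the Claim_ definition above) =====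
theorem detect_code_block_spec : Claim_equal_detect_code_block := by
  intro text _
  show detect_code_block text = detect_code_block_alt text
  exact ports_agree text
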